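-- pv_equiv track=rewrite | github.com/palaseus/dubchain | src/dubchain/vm/optimized_vm.py | _optimize_instructions
-- ===== SOURCE A (Python) =====
-- from typing import Any, Dict, List, Optional, Set, Tuple, Callable, Union
--
-- def _optimize_instructions(instructions: List[str]) -> List[str]:
--     """Apply instruction-level optimizations."""
--     optimized = []
--     i = 0
--
--     while i < len(instructions):
--         current = instructions[i]
--
--         # Peephole optimizations
--         if i + 1 < len(instructions):
--             next_inst = instructions[i + 1]
--
--             # Combine consecutive PUSH operations
--             if current == "PUSH" and next_inst == "PUSH":
--                 optimized.append("PUSH2")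
--                 i += 2
--                 continue
--
--             # Eliminate redundant operations
--             if current == "PUSH" and next_inst == "POP":
--                 i += 2  # Skip both
--                 continue
--
--         # Constant folding
--         if current == "PUSH" and i + 2 < len(instructions):
--             if instructions[i + 1] == "PUSH" and instructions[i + 2] in ["ADD", "SUB", "MUL"]:
--                 # Simple constant folding simulation
--                 optimized.append("PUSH_CONST")
--                 i += 3
--                 continue
--
--         optimized.append(current)
--         i += 1
--
--     return optimized
-- ===== SOURCE B (Python) =====
-- def _optimize_instructions(instructions):
--     """Forward scan with a one-slot pending buffer instead of index lookahead."""
--     out = []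
--     pending = None
--     for tok in instructions:
--         if pending is None:
--             pending = tok
--         elif pending == "PUSH" and tok == "PUSH":
--             out.append("PUSH2")
--             pending = None
--         elif pending == "PUSH" and tok == "POP":
--             pending = None
--         else:
--             out.append(pending)
--             pending = tok
--     if pending is not None:
--         out.append(pending)
--     return out
-- ===== Notes on version B (the rewrite author's own statement) =====
-- stated objective: simpler
-- what changed: Replaces the index-with-lookahead while loop (variable stride 1/2/3 and an unreachable constant-folding branch) by a single forward fold over the tokens with a one-slot pending buffer; the dead PUSH_CONST branch is omitted.
import Mathlib
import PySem

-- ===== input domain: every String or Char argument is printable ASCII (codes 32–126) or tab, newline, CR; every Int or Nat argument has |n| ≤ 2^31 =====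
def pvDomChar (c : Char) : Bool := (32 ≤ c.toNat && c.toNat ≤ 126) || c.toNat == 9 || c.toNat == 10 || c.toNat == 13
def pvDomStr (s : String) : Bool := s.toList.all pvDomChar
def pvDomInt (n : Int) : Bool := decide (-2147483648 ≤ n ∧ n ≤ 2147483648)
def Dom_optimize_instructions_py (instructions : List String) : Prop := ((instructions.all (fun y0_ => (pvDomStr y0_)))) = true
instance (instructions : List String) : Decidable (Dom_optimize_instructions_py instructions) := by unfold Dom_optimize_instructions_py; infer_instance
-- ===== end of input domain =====

-- One honest line: B replaces A's index-with-lookahead scan (stride 1/2/3, with a dead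
-- constant-folding branch) by a single forward pass with a one-slot pending buffer (simpler).

-- ===== PORT A =====
-- A's while loop over index i, transcribed as recursion on the remaining suffix:
-- `current` is the head, `next_inst`/`third` exist iff i+1 / i+2 are in range;
-- branches in A's order, including the dead constant-folding branch.
def pvGoA : List String → List String
  | [] => []
  | [current] => [current]                        -- no lookahead: emit, i += 1
  | [current, next_inst] =>
    if current = "PUSH" ∧ next_inst = "PUSH" then ["PUSH2"]
    else if current = "PUSH" ∧ next_inst = "POP" then []
    else current :: pvGoA [next_inst]             -- i += 1
  | current :: next_inst :: third :: rest3 =>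
    if current = "PUSH" ∧ next_inst = "PUSH" then
      "PUSH2" :: pvGoA (third :: rest3)           -- i += 2
    else if current = "PUSH" ∧ next_inst = "POP" then
      pvGoA (third :: rest3)                      -- i += 2, emit nothing
    else if current = "PUSH" ∧ next_inst = "PUSH" ∧
            (third = "ADD" ∨ third = "SUB" ∨ third = "MUL") then
      "PUSH_CONST" :: pvGoA rest3                 -- i += 3 (unreachable after the first branch)
    else
      current :: pvGoA (next_inst :: third :: rest3)  -- i += 1
termination_by l => l.length
decreasing_by all_goals (simp; try omega)

def optimize_instructions_py (instructions : List String) : List String :=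
  pvGoA instructions

-- ===== PORT B =====
-- B's single forward pass with a one-slot pending buffer.
def pvGoB : Option String → List String → List String
  | none, [] => []
  | some p, [] => [p]
  | none, tok :: ts => pvGoB (some tok) ts
  | some p, tok :: ts =>
    if p = "PUSH" ∧ tok = "PUSH" then "PUSH2" :: pvGoB none ts
    else if p = "PUSH" ∧ tok = "POP" then pvGoB none ts
    else p :: pvGoB (some tok) ts

def optimize_instructions_py_alt (instructions : List String) : List String :=
  pvGoB none instructions

-- ===== PRECONDITION & SPEC =====
def Spec_optimize_instructions_py (instructions : List String) (out : List String) : Prop := out = optimize_instructions_py_alt instructions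
instance (instructions : List String) (out : List String) : Decidable (Spec_optimize_instructions_py instructions out) := by unfold Spec_optimize_instructions_py; infer_instance

-- ===== CLAIM (what is proved, stated in full; the proofs are below) =====
def Claim_equal_optimize_instructions_py : Prop := ∀ (instructions : List String), Dom_optimize_instructions_py instructions → Spec_optimize_instructions_py instructions (optimize_instructions_py instructions)

-- ===== LEMMAS AND PROOFS =====

-- Core invariant: A's scan from `c :: l` equals B's scan with `c` pending over `l`.
theorem pvGoA_eq_pvGoB_aux : ∀ (n : Nat) (l : List String), l.length ≤ n → ∀ (c : String), pvGoA (c :: l) = pvGoB (some c) l := by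
  intro n
  induction n with
  | zero =>
    intro l hl c
    have h0 : l = [] := List.eq_nil_of_length_eq_zero (Nat.le_zero.mp hl)
    subst h0; simp [pvGoA, pvGoB]
  | succ n ih =>
    intro l hl c
    match l with
    | [] => simp [pvGoA, pvGoB]
    | [t] =>
      by_cases h1 : c = "PUSH" ∧ t = "PUSH"
      · simp [pvGoA, pvGoB, h1]
      · by_cases h2 : c = "PUSH" ∧ t = "POP"
        · simp [pvGoA, pvGoB, h1, h2]
        · simp [pvGoA, pvGoB, h2]
    | t :: u :: us =>
      have hu : pvGoA (u :: us) = pvGoB none (u :: us) := by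
        have := ih us (by simp at hl ⊢; omega) u
        rw [this]; simp [pvGoB]
      have ht : pvGoA (t :: u :: us) = pvGoB (some t) (u :: us) :=
        ih (u :: us) (by simp at hl ⊢; omega) t
      by_cases h1 : c = "PUSH" ∧ t = "PUSH"
      · have hA : pvGoA (c :: t :: u :: us) = "PUSH2" :: pvGoA (u :: us) := by
          simp [pvGoA, h1]
        rw [hA, hu]; simp [pvGoB, h1]
      · by_cases h2 : c = "PUSH" ∧ t = "POP"
        · have hA : pvGoA (c :: t :: u :: us) = pvGoA (u :: us) := by
            simp [pvGoA, h2]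
          rw [hA, hu]; simp [pvGoB, h2]
        · have hfold : ¬ (c = "PUSH" ∧ t = "PUSH" ∧ (u = "ADD" ∨ u = "SUB" ∨ u = "MUL")) := by
            rintro ⟨hc, htp, -⟩; exact h1 ⟨hc, htp⟩
          have hA : pvGoA (c :: t :: u :: us) = c :: pvGoA (t :: u :: us) := by
            simp [pvGoA, h1, h2, hfold]
          rw [hA, ht]; simp [pvGoB, h1, h2]

-- ===== VERDICT (by name: the statement is the Claim_ definition above) =====
theorem optimize_instructions_py_spec : Claim_equal_optimize_instructions_py := by
  intro instructions _
  unfold Spec_optimize_instructions_py optimize_instructions_py optimize_instructions_py_alt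
  match instructions with
  | [] => simp [pvGoA, pvGoB]
  | c :: l =>
    rw [pvGoA_eq_pvGoB_aux l.length l le_rfl c]; simp [pvGoB]
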